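-- pv_equiv track=rewrite | github.com/lunarcon/spdf_config | spdf_config.py | calc
-- ===== SOURCE A (Python) =====
-- def calc(z):
--     lst=[2,8,8,18,18,32,32,0]
--     for i in range(0,len(lst)):
--         sm=0
--         for g in range(0,i):
--             if sm <= z:
--                 sm+= lst[g]
--             else:
--                 break
--         if sm >= z:
--             return i
--             break
-- ===== SOURCE B (Python) =====
-- def calc(z):
--     lst = [2, 8, 8, 18, 18, 32, 32, 0]
--     sm = 0
--     for i in range(len(lst)):
--         if sm >= z:
--             return i
--         sm += lst[i]
--     return None
-- ===== Notes on version B (the rewrite author's own statement) =====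
-- stated objective: simpler
-- what changed: A rebuilds the prefix sum from scratch with an inner loop for every shell index; B keeps one running cumulative sum and checks it before adding each shell's capacity, in a single linear scan.
import Mathlib
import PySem

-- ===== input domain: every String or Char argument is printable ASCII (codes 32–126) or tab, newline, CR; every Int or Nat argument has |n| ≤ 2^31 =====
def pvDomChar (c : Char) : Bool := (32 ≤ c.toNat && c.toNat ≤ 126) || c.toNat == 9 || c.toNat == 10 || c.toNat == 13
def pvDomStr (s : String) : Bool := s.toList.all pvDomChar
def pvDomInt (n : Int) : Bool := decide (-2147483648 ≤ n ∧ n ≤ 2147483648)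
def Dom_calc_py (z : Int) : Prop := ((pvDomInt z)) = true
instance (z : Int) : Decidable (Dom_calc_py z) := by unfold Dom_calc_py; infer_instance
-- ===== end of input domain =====

-- B replaces A's rebuild-the-prefix-from-scratch inner loop by a single scan that
-- maintains one running cumulative sum (objective: simpler).

-- ===== PORT A =====
-- inner loop of A: for g in range(0,i): if sm <= z: sm += lst[g] else: break
def calc_py_inner (z : Int) (prefix_ : List Int) (sm : Int) : Int :=
  match prefix_ with
  | [] => sm
  | x :: rest => if sm ≤ z then calc_py_inner z rest (sm + x) else sm

-- outer loop of A: for i in range(0,len(lst)), early return when sm >= z, else fall through to None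
def calc_py_go (z : Int) (lst : List Int) (i : Nat) : Option Int :=
  if i < lst.length then
    (if calc_py_inner z (lst.take i) 0 ≥ z then some (i : Int) else calc_py_go z lst (i + 1))
  else none
termination_by lst.length - i

def calc_py (z : Int) : Option Int :=
  calc_py_go z [2, 8, 8, 18, 18, 32, 32, 0] 0

-- ===== PORT B =====
-- B's loop: one running sum sm, checked BEFORE adding lst[i]
def calc_py_alt_go (z : Int) (lst : List Int) (sm : Int) (i : Int) : Option Int :=
  match lst with
  | [] => none
  | x :: rest => if sm ≥ z then some i else calc_py_alt_go z rest (sm + x) (i + 1)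

def calc_py_alt (z : Int) : Option Int :=
  calc_py_alt_go z [2, 8, 8, 18, 18, 32, 32, 0] 0 0

-- ===== PRECONDITION & SPEC =====
def Spec_calc_py (z : Int) (out : Option Int) : Prop := out = calc_py_alt z
instance (z : Int) (out : Option Int) : Decidable (Spec_calc_py z out) := by unfold Spec_calc_py; infer_instance

-- ===== CLAIM (what is proved, stated in full; the proofs are below) =====
def Claim_equal_calc_py : Prop := ∀ (z : Int), Dom_calc_py z → Spec_calc_py z (calc_py z)

-- ===== LEMMAS AND PROOFS =====

-- A's inner loop stops adding once sm exceeds z, so for nonnegative shell capacities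
-- its result is ≥ z exactly when the whole prefix sum is ≥ z.
theorem inner_ge_iff (z : Int) (p : List Int) (sm : Int) (h : ∀ x ∈ p, 0 ≤ x) :
    (calc_py_inner z p sm ≥ z) ↔ (sm + p.sum ≥ z) := by
  induction p generalizing sm with
  | nil => simp [calc_py_inner]
  | cons x rest ih =>
    have hx : 0 ≤ x := h x (by simp)
    have hrest : ∀ y ∈ rest, 0 ≤ y := fun y hy => h y (by simp [hy])
    have hsum : 0 ≤ rest.sum := List.sum_nonneg hrest
    simp only [calc_py_inner, List.sum_cons]
    split_ifs with hc
    · rw [ih (sm + x) hrest]; constructor <;> intro <;> omega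
    · constructor <;> intro <;> omega

-- loop correspondence: A's outer loop at index k equals B's scan over the remaining
-- shells carrying the prefix sum of the first k shells.
theorem go_eq_alt_go (z : Int) (lst : List Int) (h : ∀ x ∈ lst, 0 ≤ x) :
    ∀ k : Nat, k ≤ lst.length →
      calc_py_go z lst k = calc_py_alt_go z (lst.drop k) ((lst.take k).sum) (k : Int) := by
  intro k hk
  induction hn : lst.length - k generalizing k with
  | zero =>
    have hke : k = lst.length := by omega
    subst hke
    rw [calc_py_go]
    simp [calc_py_alt_go]
  | succ n ih =>
    have hlt : k < lst.length := by omega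
    rw [calc_py_go, if_pos hlt]
    have hdrop : lst.drop k = lst[k] :: lst.drop (k + 1) := List.drop_eq_getElem_cons hlt
    rw [hdrop, calc_py_alt_go]
    have htake : (lst.take (k + 1)).sum = (lst.take k).sum + lst[k] := by
      rw [List.take_add_one, List.getElem?_eq_getElem hlt]
      rw [Option.toList_some, List.sum_append, List.sum_cons, List.sum_nil]
      omega
    have hiff := inner_ge_iff z (lst.take k) 0 (fun x hx => h x (List.mem_of_mem_take hx))
    by_cases hc : (lst.take k).sum ≥ z
    · rw [if_pos (hiff.mpr (by omega)), if_pos hc]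
    · rw [if_neg (fun hg => hc (by have := hiff.mp hg; omega)), if_neg hc]
      rw [ih (k+1) (by omega) (by omega)]
      rw [← htake]
      norm_num

theorem calc_py_eq_alt (z : Int) : calc_py z = calc_py_alt z := by
  unfold calc_py calc_py_alt
  simpa using go_eq_alt_go z [2, 8, 8, 18, 18, 32, 32, 0] (by norm_num) 0 (by norm_num)

-- ===== VERDICT (by name: the statement is the Claim_ definition above) =====
theorem calc_py_spec : Claim_equal_calc_py := by
  intro z _
  unfold Spec_calc_py
  exact calc_py_eq_alt z
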